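-- pv_equiv track=rewrite | github.com/zyy20009619/cluster | algos/CommonFunction.py | findFileRealIndex
-- ===== SOURCE A (Python) =====
-- def findFileRealIndex(variable, filename):
--     modelinfoIndex = -1
--     for varIndex in range(len(variable)):
--         if variable[varIndex] == 'module-info':
--             modelinfoIndex += 1
--         var = variable[varIndex]
--         if var.find(filename) != -1:
--             return modelinfoIndex
-- ===== SOURCE B (Python) =====
-- def findFileRealIndex(variable, filename):
--     # Two-pass: locate the first matching element, then count 'module-info' in the inclusive prefix.
--     for i, var in enumerate(variable):
--         if var.find(filename) != -1:
--             return variable[:i + 1].count('module-info') - 1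
--     return None
-- ===== Notes on version B (the rewrite author's own statement) =====
-- stated objective: alternative
-- what changed: Replaces A's single loop with a running module-info counter by a find-first-match scan followed by a count over the inclusive prefix slice.
import Mathlib
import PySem

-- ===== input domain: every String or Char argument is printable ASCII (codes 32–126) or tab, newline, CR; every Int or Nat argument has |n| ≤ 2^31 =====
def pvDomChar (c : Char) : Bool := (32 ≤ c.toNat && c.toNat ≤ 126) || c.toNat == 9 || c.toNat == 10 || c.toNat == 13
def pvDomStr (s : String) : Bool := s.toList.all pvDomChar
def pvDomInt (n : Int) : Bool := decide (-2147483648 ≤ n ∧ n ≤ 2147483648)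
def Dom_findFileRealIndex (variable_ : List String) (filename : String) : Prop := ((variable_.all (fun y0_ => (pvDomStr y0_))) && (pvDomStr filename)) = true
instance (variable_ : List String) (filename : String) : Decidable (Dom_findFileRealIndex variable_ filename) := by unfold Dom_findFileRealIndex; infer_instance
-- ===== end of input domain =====

-- B replaces A's single loop carrying a running 'module-info' counter by a two-pass
-- decomposition: find the first matching element, then count over the inclusive prefix.

-- ===== PORT A =====
-- the for-loop over indices, carried as structural recursion over the list with the counter
def findFileRealIndexGo (filename : String) : List String → Int → Option Int
  | [], _ => none
  | v :: rest, acc =>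
    let acc' := if v == "module-info" then acc + 1 else acc
    if PySem.Str.find v filename != -1 then some acc'
    else findFileRealIndexGo filename rest acc'

def findFileRealIndex (variable_ : List String) (filename : String) : Option Int :=
  findFileRealIndexGo filename variable_ (-1)

-- ===== PORT B =====
def findFileRealIndex_alt (variable_ : List String) (filename : String) : Option Int :=
  match variable_.findIdx? (fun v => PySem.Str.find v filename != -1) with
  | none => none
  | some i =>
      some ((PySem.List.count (PySem.List.slice variable_ none (some ((i : Int) + 1))) "module-info" : Int) - 1)

-- ===== PRECONDITION & SPEC =====
def Spec_findFileRealIndex (variable_ : List String) (filename : String) (out : Option Int) : Prop := out = findFileRealIndex_alt variable_ filename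
instance (variable_ : List String) (filename : String) (out : Option Int) : Decidable (Spec_findFileRealIndex variable_ filename out) := by unfold Spec_findFileRealIndex; infer_instance

-- ===== CLAIM (what is proved, stated in full; the proofs are below) =====
def Claim_equal_findFileRealIndex : Prop := ∀ (variable_ : List String) (filename : String), Dom_findFileRealIndex variable_ filename → Spec_findFileRealIndex variable_ filename (findFileRealIndex variable_ filename)

-- ===== LEMMAS AND PROOFS =====

theorem findFileRealIndexGo_eq (filename : String) (l : List String) (acc : Int) :
    findFileRealIndexGo filename l acc =
      (l.findIdx? (fun v => PySem.Str.find v filename != -1)).map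
        (fun i => acc + ((l.take (i + 1)).count "module-info" : Int)) := by
  induction l generalizing acc with
  | nil => simp [findFileRealIndexGo]
  | cons v rest ih =>
    simp only [findFileRealIndexGo, List.findIdx?_cons]
    by_cases hp : (PySem.Str.find v filename != -1) = true
    · simp only [hp, if_pos]
      by_cases hv : v = "module-info" <;>
        simp [hv]
    · simp only [Bool.not_eq_true] at hp
      simp only [hp, Bool.false_eq_true, if_false, ih]
      cases h : rest.findIdx? (fun v => PySem.Str.find v filename != -1) with
      | none => simp
      | some i =>
        simp only [Option.map_some]
        by_cases hv : v = "module-info" <;>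
          simp [hv, List.take_succ_cons]; ring_nf

-- ===== VERDICT (by name: the statement is the Claim_ definition above) =====
theorem findFileRealIndex_spec : Claim_equal_findFileRealIndex := by
  intro variable_ filename _
  unfold Spec_findFileRealIndex findFileRealIndex findFileRealIndex_alt
  rw [findFileRealIndexGo_eq]
  cases h : variable_.findIdx? (fun v => PySem.Str.find v filename != -1) with
  | none => simp
  | some i =>
    have hb : ((i : Int) + 1) = ((i + 1 : Nat) : Int) := by push_cast; ring
    simp only [Option.map_some, hb, PySem.List.slice_to_natCast, PySem.List.count_eq]
    ring_nf
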